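-- pv_equiv track=rewrite | github.com/ZdsAlpha/SegNet | Models/SegNet3D.py | calculateConvLayers
-- ===== SOURCE A (Python) =====
-- def calculateConvLayers(depth):
--     _convLayers=2
--     _i = 0
--     for i in range(depth):
--         if _i == _convLayers:
--             _i = 0
--             _convLayers+=1
--         _i += 1
--     return _convLayers
-- ===== SOURCE B (Python) =====
-- def calculateConvLayers(depth):
--     # Result is the smallest n >= 2 with n*(n+1)//2 - 1 >= depth
--     # (the layer count grows after phases of length 2, 3, 4, ...).
--     if depth <= 2:
--         return 2
--     lo, hi = 2, depth
--     while lo < hi: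
--         mid = (lo + hi) // 2
--         if mid * (mid + 1) // 2 - 1 >= depth:
--             hi = mid
--         else:
--             lo = mid + 1
--     return lo
-- ===== Notes on version B (the rewrite author's own statement) =====
-- stated objective: faster
-- what changed: Replaces the O(depth) step-by-step phase simulation with an O(log depth) binary search for the smallest n >= 2 with n*(n+1)//2 - 1 >= depth.
import Mathlib
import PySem

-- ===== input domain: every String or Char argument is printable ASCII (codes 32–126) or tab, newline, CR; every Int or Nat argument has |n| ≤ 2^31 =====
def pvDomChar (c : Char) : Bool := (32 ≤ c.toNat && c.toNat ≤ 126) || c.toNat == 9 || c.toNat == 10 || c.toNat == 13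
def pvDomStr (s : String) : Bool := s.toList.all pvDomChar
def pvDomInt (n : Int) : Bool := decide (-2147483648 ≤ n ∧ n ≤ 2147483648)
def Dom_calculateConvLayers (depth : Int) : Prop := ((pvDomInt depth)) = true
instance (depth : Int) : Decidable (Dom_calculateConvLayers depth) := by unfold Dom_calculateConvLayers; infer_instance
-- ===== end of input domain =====

-- B replaces A's O(depth) step-by-step phase simulation by an O(log depth) binary
-- search for the smallest n ≥ 2 with n*(n+1)//2 - 1 ≥ depth (measured faster).

-- ===== PORT A =====
-- literal port: for i in range(depth): if _i == _convLayers: _i = 0; _convLayers += 1; _i += 1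
def calculateConvLayers (depth : Int) : Int :=
  (((PySem.List.pyRange 0 depth 1).foldl
    (fun (s : Int × Int) _ =>
      let s' := if s.2 == s.1 then (s.1 + 1, (0 : Int)) else s
      (s'.1, s'.2 + 1))
    ((2 : Int), (0 : Int)))).1

-- ===== PORT B =====
-- the while-loop of Source B: binary search on [lo, hi]
def bsearchB (depth lo hi : Int) : Int :=
  if h : lo < hi then
    let mid := PySem.Int.floordiv (lo + hi) 2
    if depth ≤ PySem.Int.floordiv (mid * (mid + 1)) 2 - 1 then
      bsearchB depth lo mid
    else
      bsearchB depth (mid + 1) hi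
  else lo
termination_by (hi - lo).toNat
decreasing_by
  · have h2 : PySem.Int.floordiv (lo + hi) 2 < hi := by
      rw [PySem.Int.floordiv_lt_iff_lt_mul (by norm_num : (0:Int) < 2)]; omega
    omega
  · have h1 := PySem.Int.floordiv_two_mid_bounds (le_of_lt h)
    omega

def calculateConvLayers_alt (depth : Int) : Int :=
  if depth ≤ 2 then 2 else bsearchB depth 2 depth

-- ===== PRECONDITION & SPEC =====
def Spec_calculateConvLayers (depth : Int) (out : Int) : Prop := out = calculateConvLayers_alt depth
instance (depth : Int) (out : Int) : Decidable (Spec_calculateConvLayers depth out) := by unfold Spec_calculateConvLayers; infer_instance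

-- ===== CLAIM (what is proved, stated in full; the proofs are below) =====
def Claim_equal_calculateConvLayers : Prop := ∀ (depth : Int), Dom_calculateConvLayers depth → Spec_calculateConvLayers depth (calculateConvLayers depth)

-- ===== LEMMAS AND PROOFS =====

-- A's loop body, as a standalone step function (definitionally the lambda of the port)
def stepA (s : Int × Int) : Int × Int :=
  let s' := if s.2 == s.1 then (s.1 + 1, (0 : Int)) else s
  (s'.1, s'.2 + 1)

theorem foldl_ignore {α β : Type} (f : α → α) : ∀ (l : List β) (s : α),
    l.foldl (fun a _ => f a) s = f^[l.length] s := by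
  intro l
  induction l with
  | nil => intro s; simp
  | cons x xs ih => intro s; simp [List.foldl, ih, Function.iterate_succ_apply]

theorem A_eq_iterate (depth : Int) :
    calculateConvLayers depth = (stepA^[depth.toNat] ((2:Int), (0:Int))).1 := by
  unfold calculateConvLayers
  rw [show (fun (s : Int × Int) (_ : Int) =>
      let s' := if s.2 == s.1 then (s.1 + 1, (0 : Int)) else s
      (s'.1, s'.2 + 1)) = (fun a _ => stepA a) from rfl]
  rw [foldl_ignore, PySem.List.length_pyRange_one]
  norm_num

-- loop invariant for A
theorem invA : ∀ n : Nat,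
    2 ≤ (stepA^[n] ((2:Int), (0:Int))).1 ∧
    0 ≤ (stepA^[n] ((2:Int), (0:Int))).2 ∧
    (stepA^[n] ((2:Int), (0:Int))).2 ≤ (stepA^[n] ((2:Int), (0:Int))).1 ∧
    2 * (n : Int) = (stepA^[n] ((2:Int), (0:Int))).1 * ((stepA^[n] ((2:Int), (0:Int))).1 - 1)
        - 2 + 2 * (stepA^[n] ((2:Int), (0:Int))).2 ∧
    (1 ≤ n → 1 ≤ (stepA^[n] ((2:Int), (0:Int))).2) := by
  intro n
  induction n with
  | zero => norm_num
  | succ n ih =>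
    obtain ⟨h1, h2, h3, h4, h5⟩ := ih
    rw [Function.iterate_succ_apply']
    set s := stepA^[n] ((2:Int), (0:Int)) with hs
    by_cases he : s.2 = s.1
    · have hst : stepA s = (s.1 + 1, (1 : Int)) := by
        simp [stepA, he]
      rw [hst]
      refine ⟨by omega, by norm_num, by omega, ?_, by omega⟩
      push_cast
      rw [he] at h4
      linear_combination h4
    · have hst : stepA s = (s.1, s.2 + 1) := by
        simp [stepA, he]
      rw [hst]
      refine ⟨h1, by omega, by omega, ?_, by omega⟩
      push_cast
      linear_combination h4

-- binary search returns the unique c with (c-1)*c < 2*depth+2 ≤ c*(c+1), given it is bracketed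
theorem bsearch_correct (depth : Int) : ∀ (k : Nat) (lo hi c : Int), (hi - lo).toNat = k →
    2 ≤ lo → lo ≤ c → c ≤ hi →
    2 * depth + 2 ≤ c * (c + 1) → (c - 1) * c < 2 * depth + 2 →
    bsearchB depth lo hi = c := by
  intro k
  induction k using Nat.strong_induction_on with
  | _ k ih =>
    intro lo hi c hk hlo hloc hchi hcP hcN
    rw [bsearchB]
    split
    · next h =>
      have hmid := PySem.Int.floordiv_two_mid_bounds (le_of_lt h)
      have hmlt : PySem.Int.floordiv (lo + hi) 2 < hi := by
        rw [PySem.Int.floordiv_lt_iff_lt_mul (by norm_num : (0:Int) < 2)]; omega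
      set mid := PySem.Int.floordiv (lo + hi) 2 with hm
      change (if depth ≤ PySem.Int.floordiv (mid * (mid + 1)) 2 - 1 then bsearchB depth lo mid
        else bsearchB depth (mid + 1) hi) = c
      have hcond : (depth ≤ PySem.Int.floordiv (mid * (mid + 1)) 2 - 1) ↔
          2 * depth + 2 ≤ mid * (mid + 1) := by
        constructor
        · intro hc
          have : depth + 1 ≤ PySem.Int.floordiv (mid * (mid + 1)) 2 := by omega
          rw [PySem.Int.le_floordiv_iff_mul_le (by norm_num : (0:Int) < 2)] at this
          linarith
        · intro hc
          have : depth + 1 ≤ PySem.Int.floordiv (mid * (mid + 1)) 2 := by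
            rw [PySem.Int.le_floordiv_iff_mul_le (by norm_num : (0:Int) < 2)]
            linarith
          omega
      split
      · next hif =>
        -- P mid holds: answer is ≤ mid
        have hPmid : 2 * depth + 2 ≤ mid * (mid + 1) := hcond.mp hif
        have hcm : c ≤ mid := by
          by_contra hgt
          push Not at hgt
          have : mid * (mid + 1) ≤ (c - 1) * c := by nlinarith
          omega
        exact ih (mid - lo).toNat (by omega) lo mid c rfl hlo hloc hcm hcP hcN
      · next hif =>
        have hNmid : ¬ (2 * depth + 2 ≤ mid * (mid + 1)) := fun hc => hif (hcond.mpr hc)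
        push Not at hNmid
        have hcm : mid + 1 ≤ c := by
          by_contra hgt
          push Not at hgt
          have : c * (c + 1) ≤ mid * (mid + 1) := by nlinarith
          omega
        exact ih (hi - (mid + 1)).toNat (by omega) (mid + 1) hi c rfl (by omega) hcm hchi hcP hcN
    · next h => omega

-- ===== VERDICT (by name: the statement is the Claim_ definition above) =====
theorem calculateConvLayers_spec : Claim_equal_calculateConvLayers := by
  intro depth _
  unfold Spec_calculateConvLayers calculateConvLayers_alt
  by_cases hd : depth ≤ 2
  · rw [if_pos hd, A_eq_iterate]
    -- for depth ≤ 2, A's loop runs at most 2 steps and the counter stays 2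
    have h3 : depth.toNat = 0 ∨ depth.toNat = 1 ∨ depth.toNat = 2 := by omega
    rcases h3 with h3 | h3 | h3 <;> rw [h3] <;> decide
  · rw [if_neg hd]
    push Not at hd
    rw [A_eq_iterate]
    obtain ⟨h1, h2, h3, h4, h5⟩ := invA depth.toNat
    set c := (stepA^[depth.toNat] ((2:Int), (0:Int))).1 with hc
    set i := (stepA^[depth.toNat] ((2:Int), (0:Int))).2 with hi
    have hn : (depth.toNat : Int) = depth := by omega
    rw [hn] at h4
    have hi1 : 1 ≤ i := h5 (by omega)
    have hcP : 2 * depth + 2 ≤ c * (c + 1) := by nlinarith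
    have hcN : (c - 1) * c < 2 * depth + 2 := by nlinarith
    have hchi : c ≤ depth := by
      by_contra hgt
      push Not at hgt
      have : depth * (depth + 1) ≤ (c - 1) * c := by nlinarith
      nlinarith
    exact (bsearch_correct depth (depth - 2).toNat 2 depth c rfl (le_refl 2) h1 hchi hcP hcN).symm
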